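-- pv_equiv track=rewrite | github.com/r1kemp/PyCode | Google Kick Start/20A.py | binary_srch
-- ===== SOURCE A (Python) =====
-- import math
--
-- def cuts(M, N, sz):
--     ans = 0
--     for i in range(N):
--         if M[i] > sz:
--             ans += math.ceil(M[i] / sz) - 1
--
--     return ans
--
-- def binary_srch(M, N, K, lo, hi):
--     mid = (lo + hi) // 2
--     if mid == lo:
--         cuts_lo = cuts(M, N, lo)
--         if cuts_lo <= K:
--             return lo
--         else:
--             return hi
--
--     cuts_req = cuts(M, N, mid)
--
--     if cuts_req > K:
--         lo = mid
--     else: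
--         hi = mid
--
--     return binary_srch(M, N, K, lo, hi)
-- ===== SOURCE B (Python) =====
-- import math
--
-- def cuts(M, N, sz):
--     ans = 0
--     for i in range(N):
--         if M[i] > sz:
--             ans += math.ceil(M[i] / sz) - 1
--     return ans
--
-- def binary_srch(M, N, K, lo, hi):
--     # Early answer: lo itself already feasible, or empty/degenerate range.
--     if cuts(M, N, lo) <= K or lo >= hi:
--         return lo
--     # Standard half-open lower-bound search for the first feasible size in (lo, hi];
--     # if none is feasible it converges to hi.
--     a, b = lo + 1, hi
--     while a < b:
--         mid = (a + b) // 2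
--         if cuts(M, N, mid) <= K:
--             b = mid
--         else:
--             a = mid + 1
--     return a
-- ===== Notes on version B (the rewrite author's own statement) =====
-- stated objective: alternative
-- what changed: Replaces A's recursive closed-interval narrowing (mid==lo termination with a final cuts(lo) re-test) by an early feasibility test on lo followed by an iterative half-open lower-bound search with the mid+1 update over (lo, hi]; equality rests on the monotonicity of cuts.
-- outside the precondition, e.g. on binary_srch([1, 1, 8], 3, 4, -2, 5): A returns 2, B returns -2; on binary_srch([], 0, -1, 3, -1): A returns -1, B returns 3; on binary_srch([4], 1, 5, 2, 1): A does not finish within the time limit, B returns 2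
import Mathlib
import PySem

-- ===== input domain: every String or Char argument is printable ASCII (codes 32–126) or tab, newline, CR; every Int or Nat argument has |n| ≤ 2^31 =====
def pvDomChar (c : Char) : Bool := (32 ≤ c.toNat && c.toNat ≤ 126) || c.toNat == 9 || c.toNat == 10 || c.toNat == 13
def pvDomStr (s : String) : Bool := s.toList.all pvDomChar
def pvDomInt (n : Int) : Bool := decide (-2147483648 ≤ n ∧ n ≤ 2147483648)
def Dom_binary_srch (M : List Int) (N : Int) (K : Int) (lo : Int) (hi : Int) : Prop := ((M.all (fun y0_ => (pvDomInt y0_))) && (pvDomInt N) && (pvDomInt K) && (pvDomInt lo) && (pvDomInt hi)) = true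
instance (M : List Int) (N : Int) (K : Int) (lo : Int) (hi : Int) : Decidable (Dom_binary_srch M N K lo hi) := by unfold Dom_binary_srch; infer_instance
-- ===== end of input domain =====

-- B replaces A's recursive closed-interval narrowing by an early feasibility test on lo plus an
-- iterative half-open lower-bound search (mid+1 update) over (lo, hi]; same cost, different shape.

-- ===== PORT A =====
-- math.ceil(m / sz) as integer ceiling division; exact on Dom (|m| ≤ 2^31) for sz ≥ 1,
-- since the float error |m/sz|·2⁻⁵³ is smaller than the distance 1/sz of a non-integer quotient to ℤ.
def pyCeilDiv (m sz : Int) : Int := -(PySem.Int.floordiv (-m) sz)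

-- shared helper `cuts` (identical in Source A and Source B); M[i] ported with default 0, in range inside Pre_
def cutsF (M : List Int) (N : Int) (sz : Int) : Int :=
  (PySem.List.pyRange 0 N 1).foldl
    (fun ans i => if PySem.List.pyGetD M i 0 > sz then ans + (pyCeilDiv (PySem.List.pyGetD M i 0) sz - 1) else ans) 0

-- A's recursion, with a fuel guard for totality only; fuel (hi-lo).toNat + 1 is never exhausted inside Pre_
def binarySrchGo (M : List Int) (N K : Int) : Nat → Int → Int → Int
  | 0, lo, _hi => lo
  | fuel + 1, lo, hi =>
    let mid := PySem.Int.floordiv (lo + hi) 2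
    if mid = lo then
      if cutsF M N lo ≤ K then lo else hi
    else
      if cutsF M N mid > K then binarySrchGo M N K fuel mid hi
      else binarySrchGo M N K fuel lo mid

def binary_srch (M : List Int) (N : Int) (K : Int) (lo : Int) (hi : Int) : Int :=
  binarySrchGo M N K ((hi - lo).toNat + 1) lo hi

-- ===== PORT B =====
-- Source B's while-loop: first index in [a, b) with cuts ≤ K, else b
def lowerBound (M : List Int) (N K : Int) (a b : Int) : Int :=
  if h : a < b then
    -- mid = (a + b) // 2 inlined at its three uses
    if cutsF M N (PySem.Int.floordiv (a + b) 2) ≤ K then lowerBound M N K a (PySem.Int.floordiv (a + b) 2)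
    else lowerBound M N K (PySem.Int.floordiv (a + b) 2 + 1) b
  else a
termination_by (b - a).toNat
decreasing_by
  · have hm := PySem.Int.floordiv_two_mid_bounds (lo := a) (hi := b) (le_of_lt h)
    have he : PySem.Int.floordiv (a + b) 2 = (a + b) / 2 := PySem.Int.floordiv_eq_ediv_of_pos (by norm_num)
    rw [he] at hm ⊢; omega
  · have hm := PySem.Int.floordiv_two_mid_bounds (lo := a) (hi := b) (le_of_lt h)
    have he : PySem.Int.floordiv (a + b) 2 = (a + b) / 2 := PySem.Int.floordiv_eq_ediv_of_pos (by norm_num)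
    rw [he] at hm ⊢; omega

def binary_srch_alt (M : List Int) (N : Int) (K : Int) (lo : Int) (hi : Int) : Int :=
  if cutsF M N lo ≤ K ∨ lo ≥ hi then lo
  else lowerBound M N K (lo + 1) hi

-- ===== PRECONDITION & SPEC =====
-- Pre_ excludes inverted ranges lo > hi (A diverges or returns an accidental value of its narrowing),
-- N > len(M) (IndexError), and lo < 1 except where A's value is still principled (lo = hi, where both
-- sides return lo; or first N entries ≤ 0 with K ≥ 0, or all < 0, where cuts stays constant/monotone):
-- elsewhere a probed size 0 raises ZeroDivisionError, or non-positive sizes make cuts non-monotone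
-- and A's value an accident of which midpoints its narrowing probes.
def Pre_binary_srch (M : List Int) (N : Int) (K : Int) (lo : Int) (hi : Int) : Prop :=
  lo ≤ hi ∧ N ≤ (M.length : Int) ∧
    (1 ≤ lo ∨ ((∀ x ∈ M.take N.toNat, x ≤ 0) ∧ 0 ≤ K) ∨ (∀ x ∈ M.take N.toNat, x < 0) ∨
      (lo = hi ∧ (lo ≠ 0 ∨ ∀ x ∈ M.take N.toNat, x ≤ 0)))
instance (M : List Int) (N : Int) (K : Int) (lo : Int) (hi : Int) : Decidable (Pre_binary_srch M N K lo hi) := by unfold Pre_binary_srch; infer_instance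
def pvWitness_binary_srch : List Int × Int × Int × Int × Int := ([7, 3], 2, 1, 1, 7)
def Spec_binary_srch (M : List Int) (N : Int) (K : Int) (lo : Int) (hi : Int) (out : Int) : Prop := out = binary_srch_alt M N K lo hi
instance (M : List Int) (N : Int) (K : Int) (lo : Int) (hi : Int) (out : Int) : Decidable (Spec_binary_srch M N K lo hi out) := by unfold Spec_binary_srch; infer_instance

-- ===== CLAIM (what is proved, stated in full; the proofs are below) =====
def Claim_equal_binary_srch : Prop := ∀ (M : List Int) (N : Int) (K : Int) (lo : Int) (hi : Int), Dom_binary_srch M N K lo hi → Pre_binary_srch M N K lo hi → Spec_binary_srch M N K lo hi (binary_srch M N K lo hi)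

-- ===== LEMMAS AND PROOFS =====

-- per-element monotonicity of a cut term in the size
theorem term_anti (m s s' : Int) (h1 : 1 ≤ s) (hss : s ≤ s') :
    (if m > s' then pyCeilDiv m s' - 1 else 0) ≤ (if m > s then pyCeilDiv m s - 1 else 0) := by
  have hs : (0:Int) < s := by omega
  have hs' : (0:Int) < s' := by omega
  split_ifs with h' h h
  · unfold pyCeilDiv
    rw [PySem.Int.floordiv_eq_ediv_of_pos hs, PySem.Int.floordiv_eq_ediv_of_pos hs']
    have hneg : -m < 0 := by omega
    have hq : (-m) / s < 0 := Int.ediv_neg_of_neg_of_pos hneg hs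
    have h2 : ((-m) / s) * s' ≤ ((-m) / s) * s := mul_le_mul_of_nonpos_left hss (le_of_lt hq)
    have h3 : ((-m) / s) * s ≤ -m := Int.ediv_mul_le _ (by omega)
    have h4 : (-m) / s ≤ (-m) / s' := (Int.le_ediv_iff_mul_le hs').mpr (le_trans h2 h3)
    omega
  · omega
  · unfold pyCeilDiv
    rw [PySem.Int.floordiv_eq_ediv_of_pos hs]
    have hneg : -m < 0 := by omega
    have hq : (-m) / s < 0 := Int.ediv_neg_of_neg_of_pos hneg hs
    omega
  · exact le_refl 0

theorem foldl_add_anti (l : List Int) (f g : Int → Int) (hfg : ∀ i ∈ l, f i ≤ g i) :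
    ∀ (a b : Int), a ≤ b →
      l.foldl (fun ans i => ans + f i) a ≤ l.foldl (fun ans i => ans + g i) b := by
  induction l with
  | nil => intro a b hab; simpa using hab
  | cons x xs ih =>
    intro a b hab
    simp only [List.foldl_cons]
    refine ih (fun i hi => hfg i (List.mem_cons_of_mem _ hi)) _ _ ?_
    have := hfg x List.mem_cons_self
    omega

theorem cutsF_eq_add (M : List Int) (N sz : Int) :
    cutsF M N sz = (PySem.List.pyRange 0 N 1).foldl
      (fun ans i => ans + (if PySem.List.pyGetD M i 0 > sz then pyCeilDiv (PySem.List.pyGetD M i 0) sz - 1 else 0)) 0 := by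
  unfold cutsF
  congr 1
  funext ans i
  split <;> simp

-- cuts is antitone in the size, for sizes ≥ 1
theorem cutsF_anti (M : List Int) (N : Int) {s s' : Int} (h1 : 1 ≤ s) (hss : s ≤ s') :
    cutsF M N s' ≤ cutsF M N s := by
  rw [cutsF_eq_add, cutsF_eq_add]
  exact foldl_add_anti _ _ _
    (fun i _ => term_anti (PySem.List.pyGetD M i 0) s s' h1 hss) 0 0 le_rfl

theorem good_mono (M : List Int) (N K : Int) {s s' : Int} (h1 : 1 ≤ s) (hss : s ≤ s')
    (h : cutsF M N s ≤ K) : cutsF M N s' ≤ K := le_trans (cutsF_anti M N h1 hss) h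

-- B's loop returns the first feasible size in [a, b), else b
theorem lowerBound_spec (M : List Int) (N K : Int) (a b : Int)
    (Hup : ∀ s s', a ≤ s → s ≤ s' → cutsF M N s ≤ K → cutsF M N s' ≤ K) (hab : a ≤ b) :
    a ≤ lowerBound M N K a b ∧ lowerBound M N K a b ≤ b ∧
    (∀ s, a ≤ s → s < lowerBound M N K a b → ¬ cutsF M N s ≤ K) ∧
    (lowerBound M N K a b < b → cutsF M N (lowerBound M N K a b) ≤ K) := by
  rw [lowerBound]
  have he : PySem.Int.floordiv (a + b) 2 = (a + b) / 2 :=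
    PySem.Int.floordiv_eq_ediv_of_pos (by norm_num)
  split
  case isTrue h =>
    rw [he]
    split
    case isTrue hg =>
      obtain ⟨i1, i2, i3, i4⟩ := lowerBound_spec M N K a ((a + b) / 2) Hup (by omega)
      refine ⟨i1, by omega, i3, fun hr => ?_⟩
      rcases lt_or_eq_of_le i2 with hlt | heq
      · exact i4 hlt
      · rw [heq]; exact hg
    case isFalse hg =>
      obtain ⟨i1, i2, i3, i4⟩ := lowerBound_spec M N K ((a + b) / 2 + 1) b
        (fun s s' hs hss hgood => Hup s s' (by omega) hss hgood) (by omega)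
      refine ⟨by omega, i2, fun s hs1 hs2 hc => ?_, i4⟩
      by_cases hsm : s ≤ (a + b) / 2
      · exact hg (Hup s ((a + b) / 2) (by omega) hsm hc)
      · exact i3 s (by omega) hs2 hc
  case isFalse h =>
    exact ⟨le_refl a, hab, fun s hs1 hs2 => by omega, fun hab2 => absurd hab2 h⟩
termination_by (b - a).toNat
decreasing_by
  · omega
  · omega

-- A's recursion, on lo < hi with enough fuel, satisfies the same characterisation
theorem binarySrchGo_spec (M : List Int) (N K : Int) (fuel : Nat) (lo hi : Int)
    (Hup : ∀ s s', lo ≤ s → s ≤ s' → cutsF M N s ≤ K → cutsF M N s' ≤ K)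
    (hlt : lo < hi) (hfuel : (hi - lo).toNat < fuel) :
    (cutsF M N lo ≤ K → binarySrchGo M N K fuel lo hi = lo) ∧
    (¬ cutsF M N lo ≤ K →
      lo + 1 ≤ binarySrchGo M N K fuel lo hi ∧ binarySrchGo M N K fuel lo hi ≤ hi ∧
      (∀ s, lo + 1 ≤ s → s < binarySrchGo M N K fuel lo hi → ¬ cutsF M N s ≤ K) ∧
      (binarySrchGo M N K fuel lo hi < hi → cutsF M N (binarySrchGo M N K fuel lo hi) ≤ K)) := by
  induction fuel generalizing lo hi with
  | zero => omega
  | succ n ih =>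
    have he : PySem.Int.floordiv (lo + hi) 2 = (lo + hi) / 2 :=
      PySem.Int.floordiv_eq_ediv_of_pos (by norm_num)
    simp only [binarySrchGo, he]
    by_cases hmid : (lo + hi) / 2 = lo
    · have hhi : hi = lo + 1 := by omega
      rw [if_pos hmid]
      constructor
      · intro hlo; rw [if_pos hlo]
      · intro hlo
        rw [if_neg hlo]
        exact ⟨by omega, by omega, fun s hs1 hs2 => by omega, fun hr => by omega⟩
    · have hb1 : lo < (lo + hi) / 2 := by omega
      have hb2 : (lo + hi) / 2 < hi := by omega
      rw [if_neg hmid]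
      by_cases hg : cutsF M N ((lo + hi) / 2) > K
      · rw [if_pos hg]
        obtain ⟨_, ihb⟩ := ih ((lo + hi) / 2) hi
          (fun s s' hs hss hgood => Hup s s' (by omega) hss hgood) hb2 (by omega)
        obtain ⟨i1, i2, i3, i4⟩ := ihb (fun hc => absurd hc (not_le.mpr hg))
        constructor
        · intro hlo
          exact absurd (Hup lo ((lo + hi) / 2) le_rfl (le_of_lt hb1) hlo) (not_le.mpr hg)
        · intro _
          refine ⟨by omega, i2, fun s hs1 hs2 hc => ?_, i4⟩
          by_cases hsm : s ≤ (lo + hi) / 2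
          · exact absurd (Hup s ((lo + hi) / 2) (by omega) hsm hc) (not_le.mpr hg)
          · exact i3 s (by omega) hs2 hc
      · rw [if_neg hg]
        obtain ⟨ihg, ihb⟩ := ih lo ((lo + hi) / 2) Hup hb1 (by omega)
        constructor
        · exact ihg
        · intro hlo
          obtain ⟨i1, i2, i3, i4⟩ := ihb hlo
          refine ⟨i1, by omega, i3, fun _ => ?_⟩
          rcases lt_or_eq_of_le i2 with hlt | heq
          · exact i4 hlt
          · rw [heq]; exact not_lt.mp (fun hc => hg hc)

-- each cut term vanishes or is negative when the element is non-positive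
theorem term_nonpos (m s : Int) (hm : m ≤ 0) :
    (if m > s then pyCeilDiv m s - 1 else 0) ≤ 0 := by
  split_ifs with h
  · unfold pyCeilDiv
    have hq := PySem.Int.floordiv_mul_add_mod (-m) s
    have hr := PySem.Int.mod_neg_bounds (-m) (show s < 0 by omega)
    by_contra hcon
    have hle : PySem.Int.floordiv (-m) s ≤ -2 := by omega
    have h2 : (-2) * s ≤ PySem.Int.floordiv (-m) s * s :=
      mul_le_mul_of_nonpos_right hle (by omega)
    omega
  · exact le_refl 0

-- each cut term is exactly zero when the element is negative
theorem term_zero (m s : Int) (hm : m < 0) :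
    (if m > s then pyCeilDiv m s - 1 else 0) = 0 := by
  split_ifs with h
  · unfold pyCeilDiv
    have hq := PySem.Int.floordiv_mul_add_mod (-m) s
    have hr := PySem.Int.mod_neg_bounds (-m) (show s < 0 by omega)
    have hd : PySem.Int.floordiv (-m) s = -1 := by
      rcases lt_trichotomy (PySem.Int.floordiv (-m) s) (-1) with hlt | heq | hgt
      · exfalso
        have h2 : (-2) * s ≤ PySem.Int.floordiv (-m) s * s :=
          mul_le_mul_of_nonpos_right (by omega) (by omega)
        omega
      · exact heq
      · exfalso
        have h2 : PySem.Int.floordiv (-m) s * s ≤ 0 :=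
          mul_nonpos_of_nonneg_of_nonpos (by omega) (by omega)
        omega
    rw [hd]; ring
  · rfl

theorem foldl_add_zero (l : List Int) : ∀ a : Int, l.foldl (fun ans _ => ans + 0) a = a := by
  induction l with
  | nil => intro a; rfl
  | cons x xs ih => intro a; simpa using ih (a + 0)

-- pyRange elements index into the first N entries of M
theorem pyGetD_mem_take (M : List Int) (N i : Int) (hN : N ≤ (M.length : Int))
    (hi : i ∈ PySem.List.pyRange 0 N 1) : PySem.List.pyGetD M i 0 ∈ M.take N.toNat := by
  rw [PySem.List.mem_pyRange_one] at hi
  have hlen : i < (M.length : Int) := by omega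
  rw [PySem.List.pyGetD_eq_getElem M 0 (by omega) hlen]
  have hi2 : i.toNat < (M.take N.toNat).length := by
    simp only [List.length_take]
    omega
  have := List.getElem_mem hi2
  rwa [List.getElem_take] at this

-- cuts is non-positive when the first N entries are non-positive
theorem cutsF_nonpos (M : List Int) (N s : Int) (hN : N ≤ (M.length : Int))
    (hall : ∀ x ∈ M.take N.toNat, x ≤ 0) : cutsF M N s ≤ 0 := by
  rw [cutsF_eq_add]
  have h := foldl_add_anti (PySem.List.pyRange 0 N 1)
    (fun i => if PySem.List.pyGetD M i 0 > s then pyCeilDiv (PySem.List.pyGetD M i 0) s - 1 else 0)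
    (fun _ => 0)
    (fun i hi => term_nonpos _ s (hall _ (pyGetD_mem_take M N i hN hi))) 0 0 le_rfl
  calc _ ≤ _ := h
    _ = 0 := foldl_add_zero _ 0

-- cuts is identically zero when the first N entries are negative
theorem cutsF_zero (M : List Int) (N s : Int) (hN : N ≤ (M.length : Int))
    (hall : ∀ x ∈ M.take N.toNat, x < 0) : cutsF M N s = 0 := by
  refine le_antisymm (cutsF_nonpos M N s hN (fun x hx => le_of_lt (hall x hx))) ?_
  rw [cutsF_eq_add]
  have h := foldl_add_anti (PySem.List.pyRange 0 N 1)
    (fun _ => 0)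
    (fun i => if PySem.List.pyGetD M i 0 > s then pyCeilDiv (PySem.List.pyGetD M i 0) s - 1 else 0)
    (fun i hi => ge_of_eq (term_zero _ s (hall _ (pyGetD_mem_take M N i hN hi)))) 0 0 le_rfl
  calc (0:Int) = _ := (foldl_add_zero _ 0).symm
    _ ≤ _ := h

-- the characterisation has a unique solution
theorem spec_unique (P : Int → Prop) (a b r1 r2 : Int)
    (h1 : a ≤ r1 ∧ r1 ≤ b ∧ (∀ s, a ≤ s → s < r1 → ¬ P s) ∧ (r1 < b → P r1))
    (h2 : a ≤ r2 ∧ r2 ≤ b ∧ (∀ s, a ≤ s → s < r2 → ¬ P s) ∧ (r2 < b → P r2)) : r1 = r2 := by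
  obtain ⟨ha1, hb1, hall1, hg1⟩ := h1
  obtain ⟨ha2, hb2, hall2, hg2⟩ := h2
  rcases lt_trichotomy r1 r2 with h | h | h
  · exact absurd (hg1 (lt_of_lt_of_le h hb2)) (hall2 r1 ha1 h)
  · exact h
  · exact absurd (hg2 (lt_of_lt_of_le h hb1)) (hall1 r2 ha2 h)

-- ===== VERDICT (by name: the statement is the Claim_ definition above) =====
theorem binary_srch_spec : Claim_equal_binary_srch := by
  unfold Claim_equal_binary_srch
  intro M N K lo hi _hdom hpre
  obtain ⟨h2, hN, hcase⟩ := hpre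
  unfold Spec_binary_srch binary_srch binary_srch_alt
  rcases eq_or_lt_of_le h2 with heq | hlt
  · subst heq
    rw [if_pos (Or.inr (le_refl lo))]
    have hf : (lo - lo).toNat + 1 = 1 := by omega
    rw [hf]
    have he : PySem.Int.floordiv (lo + lo) 2 = (lo + lo) / 2 :=
      PySem.Int.floordiv_eq_ediv_of_pos (by norm_num)
    simp only [binarySrchGo, he]
    have hm : (lo + lo) / 2 = lo := by omega
    rw [if_pos hm]
    split <;> rfl
  · have Hup : ∀ s s', lo ≤ s → s ≤ s' → cutsF M N s ≤ K → cutsF M N s' ≤ K := by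
      rcases hcase with h1 | ⟨hall, hK⟩ | hall | ⟨heq, _⟩
      · exact fun s s' hs hss hg => good_mono M N K (by omega) hss hg
      · exact fun s s' _ _ _ => le_trans (cutsF_nonpos M N s' hN hall) hK
      · intro s s' _ _ hg
        rw [cutsF_zero M N s' hN hall]
        rw [cutsF_zero M N s hN hall] at hg
        exact hg
      · omega
    have hA := binarySrchGo_spec M N K ((hi - lo).toNat + 1) lo hi Hup hlt (by omega)
    by_cases hg : cutsF M N lo ≤ K
    · rw [if_pos (Or.inl hg)]; exact hA.1 hg
    · rw [if_neg (by simp [hg]; omega)]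
      exact spec_unique (fun s => cutsF M N s ≤ K) (lo + 1) hi _ _ (hA.2 hg)
        (lowerBound_spec M N K (lo + 1) hi
          (fun s s' hs hss hgood => Hup s s' (by omega) hss hgood) (by omega))
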